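-- pv_equiv track=rewrite | github.com/nikita-petrashen/yandex_algs | roman/another.py | check_three_cons_restr
-- ===== SOURCE A (Python) =====
-- THREE_CONS_RESTR = {"I", "X", "C", "M"}
--
-- def check_three_cons_restr(number):
--     cons_count = 0
--     cons_char = None
--     for c in number:
--         if c in THREE_CONS_RESTR:
--             if c == cons_char:
--                 cons_count += 1
--                 if cons_count > 3:
--                     return False
--             else:
--                 cons_count = 1
--                 cons_char = c
--
--     return True
-- ===== SOURCE B (Python) =====
-- THREE_CONS_RESTR = {"I", "X", "C", "M"}
--
-- def check_three_cons_restr(number):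
--     filtered = "".join(c for c in number if c in THREE_CONS_RESTR)
--     return not any(c * 4 in filtered for c in "IXCM")
-- ===== Notes on version B (the rewrite author's own statement) =====
-- stated objective: alternative
-- what changed: B drops the non-restricted characters once and then tests whether some restricted character repeated four times occurs as a substring of the filtered string, replacing A's stateful scan with a run counter, a current-character register and an early return.
import Mathlib
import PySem

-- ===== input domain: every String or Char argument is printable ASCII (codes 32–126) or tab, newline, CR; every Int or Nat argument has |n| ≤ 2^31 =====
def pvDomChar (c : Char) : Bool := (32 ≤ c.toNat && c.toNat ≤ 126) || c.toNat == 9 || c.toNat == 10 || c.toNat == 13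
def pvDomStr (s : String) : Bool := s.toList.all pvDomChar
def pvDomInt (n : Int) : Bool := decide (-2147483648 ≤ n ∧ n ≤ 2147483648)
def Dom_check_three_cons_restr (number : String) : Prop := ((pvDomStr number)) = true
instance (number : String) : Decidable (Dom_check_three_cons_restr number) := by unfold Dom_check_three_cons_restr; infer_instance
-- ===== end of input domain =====

-- B filters out the non-restricted characters once and then searches the filtered string for a four-fold repetition of a restricted character as a substring, instead of A's stateful counter scan; objective: alternative algorithm (substring search vs run counting).


-- ===== PORT A =====
-- c in THREE_CONS_RESTR = {"I","X","C","M"}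
def aRestr (c : Char) : Bool := c == 'I' || c == 'X' || c == 'C' || c == 'M'

-- A's for-loop with its early return; state = (cons_count, cons_char)
def aLoop : List Char → Int → Option Char → Bool
  | [], _, _ => true
  | c :: rest, cnt, cc =>
    if aRestr c then
      if some c == cc then
        if cnt + 1 > 3 then false else aLoop rest (cnt + 1) cc
      else aLoop rest 1 (some c)
    else aLoop rest cnt cc

def check_three_cons_restr (number : String) : Bool :=
  aLoop number.toList 0 none

-- ===== PORT B =====
def bRestr (c : Char) : Bool := c == 'I' || c == 'X' || c == 'C' || c == 'M'

-- filtered = "".join(c for c in number if c in THREE_CONS_RESTR)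
-- return not any(c * 4 in filtered for c in "IXCM")   ('in' on strings = PySem substring test)
def check_three_cons_restr_alt (number : String) : Bool :=
  let filtered := number.toList.filter bRestr
  !(['I', 'X', 'C', 'M'].any fun c => PySem.Chars.isIn (List.replicate 4 c) filtered)

-- ===== PRECONDITION & SPEC =====
def Spec_check_three_cons_restr (number : String) (out : Bool) : Prop := out = check_three_cons_restr_alt number
instance (number : String) (out : Bool) : Decidable (Spec_check_three_cons_restr number out) := by unfold Spec_check_three_cons_restr; infer_instance

-- ===== CLAIM (what is proved, stated in full; the proofs are below) =====
def Claim_equal_check_three_cons_restr : Prop := ∀ (number : String), Dom_check_three_cons_restr number → Spec_check_three_cons_restr number (check_three_cons_restr number)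

-- ===== LEMMAS AND PROOFS =====

-- A's loop ignores non-restricted characters: it equals its own run on the filtered list.
theorem aLoop_filter (l : List Char) : ∀ (cnt : Int) (cc : Option Char),
    aLoop l cnt cc = aLoop (l.filter aRestr) cnt cc := by
  induction l with
  | nil => intro cnt cc; rfl
  | cons c rest ih =>
    intro cnt cc
    by_cases h : aRestr c
    · simp [aLoop, h, ih]
    · simp [aLoop, h, ih]

-- a shorter all-c replicate is a prefix of a longer one
theorem replicate_prefix_replicate (c : Char) {m n : ℕ} (h : m ≤ n) :
    List.replicate m c <+: List.replicate n c :=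
  ⟨List.replicate (n - m) c, by rw [← List.replicate_add]; congr 1; omega⟩

-- invariant: mid-run for character c with k = 4 - cons_count remaining slots (1 ≤ k ≤ 3),
-- A's loop succeeds iff no character has a 4-run ahead and the current run does not continue k more times.
theorem aLoop_inv (l : List Char) : ∀ (k : ℕ) (c : Char), 1 ≤ k → k ≤ 3 →
    (∀ x ∈ l, aRestr x) →
    (aLoop l (4 - (k : Int)) (some c) = true ↔
      (∀ d, ¬ (List.replicate 4 d <:+: l)) ∧ ¬ (List.replicate k c <+: l)) := by
  induction l with
  | nil =>
    intro k c hk1 _ _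
    simp only [aLoop, List.infix_nil, List.prefix_nil, List.replicate_eq_nil_iff]
    constructor
    · intro _; exact ⟨fun d => by omega, by omega⟩
    · intro _; trivial
  | cons d rest ih =>
    intro k c hk1 hk3 hall
    have hAr : aRestr d = true := hall d (List.mem_cons_self ..)
    have hrest : ∀ x ∈ rest, aRestr x := fun x hx => hall x (List.mem_cons_of_mem _ hx)
    have hrepl : List.replicate k c = c :: List.replicate (k - 1) c := by
      conv_lhs => rw [show k = (k - 1) + 1 by omega]
      rw [List.replicate_succ]
    by_cases hd : d = c
    · subst hd
      rw [show aLoop (d :: rest) (4 - (k : Int)) (some d)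
            = if 4 - (k : Int) + 1 > 3 then false else aLoop rest (4 - (k : Int) + 1) (some d) by
          simp [aLoop, hAr]]
      by_cases hk : k = 1
      · subst hk
        rw [if_pos (by norm_num)]
        simp [hrepl]
      · rw [if_neg (by omega)]
        rw [show (4 : Int) - (k : Int) + 1 = 4 - ((k - 1 : ℕ) : Int) by omega]
        rw [ih (k - 1) d (by omega) (by omega) hrest]
        constructor
        · rintro ⟨h1, h2⟩
          refine ⟨fun e he => ?_, fun hp => ?_⟩
          · rcases List.infix_cons_iff.mp he with hpre | hinf
            · rw [show List.replicate 4 e = e :: List.replicate 3 e from rfl,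
                List.cons_prefix_cons] at hpre
              rcases hpre with ⟨rfl, h3⟩
              exact h2 ((replicate_prefix_replicate e (by omega)).trans h3)
            · exact h1 e hinf
          · rw [hrepl, List.cons_prefix_cons] at hp
            exact h2 hp.2
        · rintro ⟨h1, h2⟩
          refine ⟨fun e he => h1 e (List.infix_cons_iff.mpr (Or.inr he)), fun hp => ?_⟩
          exact h2 (by rw [hrepl, List.cons_prefix_cons]; exact ⟨rfl, hp⟩)
    · rw [show aLoop (d :: rest) (4 - (k : Int)) (some c) = aLoop rest 1 (some d) by
        simp [aLoop, hAr, hd]]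
      rw [show (1 : Int) = 4 - ((3 : ℕ) : Int) by norm_num]
      rw [ih 3 d (by omega) (by omega) hrest]
      constructor
      · rintro ⟨h1, h2⟩
        refine ⟨fun e he => ?_, fun hp => ?_⟩
        · rcases List.infix_cons_iff.mp he with hpre | hinf
          · rw [show List.replicate 4 e = e :: List.replicate 3 e from rfl,
              List.cons_prefix_cons] at hpre
            rcases hpre with ⟨rfl, h3⟩
            exact h2 h3
          · exact h1 e hinf
        · rw [hrepl, List.cons_prefix_cons] at hp
          exact hd hp.1.symm
      · rintro ⟨h1, _⟩
        refine ⟨fun e he => h1 e (List.infix_cons_iff.mpr (Or.inr he)), fun hp => ?_⟩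
        exact h1 d (List.infix_cons_iff.mpr (Or.inl (by
          rw [show List.replicate 4 d = d :: List.replicate 3 d from rfl, List.cons_prefix_cons]
          exact ⟨rfl, hp⟩)))

-- start state (cons_char = None, cons_count = 0): success iff no character has a 4-run
theorem aLoop_start (l : List Char) (hall : ∀ x ∈ l, aRestr x) :
    aLoop l 0 none = true ↔ ∀ d, ¬ (List.replicate 4 d <:+: l) := by
  cases l with
  | nil => simp [aLoop, List.infix_nil]
  | cons d rest =>
    have hAr : aRestr d = true := hall d (List.mem_cons_self ..)
    have hrest : ∀ x ∈ rest, aRestr x := fun x hx => hall x (List.mem_cons_of_mem _ hx)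
    rw [show aLoop (d :: rest) 0 none = aLoop rest 1 (some d) by simp [aLoop, hAr]]
    rw [show (1 : Int) = 4 - ((3 : ℕ) : Int) by norm_num]
    rw [aLoop_inv rest 3 d (by omega) (by omega) hrest]
    constructor
    · rintro ⟨h1, h2⟩ e he
      rcases List.infix_cons_iff.mp he with hpre | hinf
      · rw [show List.replicate 4 e = e :: List.replicate 3 e from rfl,
          List.cons_prefix_cons] at hpre
        rcases hpre with ⟨rfl, h3⟩
        exact h2 h3
      · exact h1 e hinf
    · intro h
      refine ⟨fun e he => h e (List.infix_cons_iff.mpr (Or.inr he)), fun hp => ?_⟩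
      exact h d (List.infix_cons_iff.mpr (Or.inl (by
        rw [show List.replicate 4 d = d :: List.replicate 3 d from rfl, List.cons_prefix_cons]
        exact ⟨rfl, hp⟩)))

-- on an all-restricted list, a 4-run character must be one of the four restricted characters
theorem fourRun_restricted (l : List Char) (hall : ∀ x ∈ l, aRestr x) :
    (∀ d, ¬ (List.replicate 4 d <:+: l)) ↔
      ∀ c ∈ ['I', 'X', 'C', 'M'], ¬ (List.replicate 4 c <:+: l) := by
  constructor
  · intro h c _ hc; exact h c hc
  · intro h d hd
    have hmem : d ∈ l := hd.subset (by simp)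
    have := hall d hmem
    simp only [aRestr, Bool.or_eq_true, beq_iff_eq] at this
    rcases this with ((rfl | rfl) | rfl) | rfl <;> exact h _ (by simp) hd

-- ===== VERDICT (by name: the statement is the Claim_ definition above) =====
theorem check_three_cons_restr_spec : Claim_equal_check_three_cons_restr := by
  intro number _
  unfold Spec_check_three_cons_restr check_three_cons_restr check_three_cons_restr_alt
  have hb : bRestr = aRestr := rfl
  rw [hb, aLoop_filter]
  rw [Bool.eq_iff_iff]
  rw [aLoop_start _ (fun x hx => List.of_mem_filter hx)]
  rw [fourRun_restricted _ (fun x hx => List.of_mem_filter hx)]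
  simp only [Bool.not_eq_eq_eq_not, Bool.not_true, List.any_eq_false]
  constructor
  · intro h c hc ht
    exact h c hc ((PySem.Chars.isIn_iff_infix _ _).mp ht)
  · intro h c hc hinf
    exact h c hc ((PySem.Chars.isIn_iff_infix _ _).mpr hinf)
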